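-- pv_equiv track=rewrite | github.com/leejohy-0223/python-solve | python/t_0806/q6/Solution.py | solution
-- ===== SOURCE A (Python) =====
-- def solution(steps_one, names_one, steps_two, names_two, steps_three, names_three):
--     answer = dict()
--
--     calculate(answer, names_one, steps_one)
--     calculate(answer, names_two, steps_two)
--     calculate(answer, names_three, steps_three)
--
--     sorted_dict = sorted(answer.items(), key=lambda x: (x[1], x[0]), reverse=True)  # 이름은 reverse 반대로,,짜식아
--
--     result = []
--     for i in sorted_dict:
--         result.append(i[0])
--
--     return result
--
-- def calculate(answer, names_one, steps_one):
--     nMap = dict()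
--     for step, name in zip(steps_one, names_one):
--         if name in nMap:
--             nMap[name] = max(nMap[name], step)
--         else:
--             nMap[name] = step
--     # 기존 내용에 더하기
--     for key, value in nMap.items():
--         if key in answer:
--             answer[key] += value
--         else:
--             answer[key] = value
-- ===== SOURCE B (Python) =====
-- def _best(pairs, name):
--     m = None
--     for s, n in pairs:
--         if n == name and (m is None or s > m):
--             m = s
--     return m
--
--
-- def solution(steps_one, names_one, steps_two, names_two, steps_three, names_three):
--     groups = [list(zip(steps_one, names_one)),
--               list(zip(steps_two, names_two)),
--               list(zip(steps_three, names_three))]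
--     names = list(dict.fromkeys([n for g in groups for _, n in g]))
--     items = []
--     for name in names:
--         total = 0
--         for g in groups:
--             b = _best(g, name)
--             if b is not None:
--                 total += b
--         items.append((name, total))
--     items.sort(key=lambda x: (x[1], x[0]), reverse=True)
--     return [name for name, _ in items]
-- ===== Notes on version B (the rewrite author's own statement) =====
-- stated objective: alternative
-- what changed: B drops A's dict-building merge passes entirely: it dedups the names once and, for each distinct name, scans the three (step,name) zip lists directly for that name's per-list maximum, summing them, then sorts the (name,total) pairs with the same key.
import Mathlib
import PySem

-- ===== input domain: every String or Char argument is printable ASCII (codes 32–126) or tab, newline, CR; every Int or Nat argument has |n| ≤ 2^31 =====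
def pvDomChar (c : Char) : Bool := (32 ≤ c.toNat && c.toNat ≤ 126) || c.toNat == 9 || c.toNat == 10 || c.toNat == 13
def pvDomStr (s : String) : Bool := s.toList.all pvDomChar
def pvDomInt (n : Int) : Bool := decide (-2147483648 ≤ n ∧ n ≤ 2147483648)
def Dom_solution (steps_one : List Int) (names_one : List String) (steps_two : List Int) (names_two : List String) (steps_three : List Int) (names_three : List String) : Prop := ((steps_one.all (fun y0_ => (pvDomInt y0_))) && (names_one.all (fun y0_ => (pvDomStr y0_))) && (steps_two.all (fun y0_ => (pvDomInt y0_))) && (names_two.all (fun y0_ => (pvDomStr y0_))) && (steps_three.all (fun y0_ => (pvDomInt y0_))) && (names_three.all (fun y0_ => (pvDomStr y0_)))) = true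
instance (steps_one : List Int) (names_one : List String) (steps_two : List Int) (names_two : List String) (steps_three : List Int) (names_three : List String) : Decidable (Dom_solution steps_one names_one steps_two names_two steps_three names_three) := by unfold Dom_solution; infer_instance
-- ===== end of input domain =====

-- B replaces A's per-list dict merges by a dedup-names pass with direct per-name scans of the
-- zipped lists (no dicts), same sort key; alternative decomposition, not claimed faster.

-- ===== PORT A =====
-- Python helper `calculate` mutates `answer`; ported as a function returning the updated dict.
def calculate (answer : PySem.Dict String Int) (names_one : List String) (steps_one : List Int) : PySem.Dict String Int :=
  let nMap : PySem.Dict String Int :=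
    (steps_one.zip names_one).foldl
      (fun m p => if m.contains p.2 then m.insert p.2 (max (m.getD p.2 0) p.1) else m.insert p.2 p.1)
      PySem.Dict.empty
  nMap.items.foldl
    (fun a kv => if a.contains kv.1 then a.insert kv.1 (a.getD kv.1 0 + kv.2) else a.insert kv.1 kv.2)
    answer

def solution (steps_one : List Int) (names_one : List String) (steps_two : List Int) (names_two : List String) (steps_three : List Int) (names_three : List String) : List String :=
  let answer := calculate (calculate (calculate PySem.Dict.empty names_one steps_one) names_two steps_two) names_three steps_three
  let sorted_dict := PySem.List.sorted2 answer.items (fun x => x.2) (fun x => x.1) true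
  sorted_dict.foldl (fun result i => result ++ [i.1]) []

-- ===== PORT B =====
def bestStep (pairs : List (Int × String)) (name : String) : Option Int :=
  pairs.foldl
    (fun m p => if p.2 == name && (m.isNone || decide (m.getD 0 < p.1)) then some p.1 else m)
    none

def totalSteps (groups : List (List (Int × String))) (name : String) : Int :=
  groups.foldl
    (fun total g => match bestStep g name with | some b => total + b | none => total)
    0

def solution_alt (steps_one : List Int) (names_one : List String) (steps_two : List Int) (names_two : List String) (steps_three : List Int) (names_three : List String) : List String :=
  let groups := [steps_one.zip names_one, steps_two.zip names_two, steps_three.zip names_three]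
  let names := PySem.List.dedup (groups.flatMap (fun g => g.map (fun p => p.2)))
  let items := names.map (fun name => (name, totalSteps groups name))
  (PySem.List.sorted2 items (fun x => x.2) (fun x => x.1) true).map (fun x => x.1)

-- ===== PRECONDITION & SPEC =====
def Spec_solution (steps_one : List Int) (names_one : List String) (steps_two : List Int) (names_two : List String) (steps_three : List Int) (names_three : List String) (out : List String) : Prop := out = solution_alt steps_one names_one steps_two names_two steps_three names_three
instance (steps_one : List Int) (names_one : List String) (steps_two : List Int) (names_two : List String) (steps_three : List Int) (names_three : List String) (out : List String) : Decidable (Spec_solution steps_one names_one steps_two names_two steps_three names_three out) := by unfold Spec_solution; infer_instance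

-- ===== CLAIM (what is proved, stated in full; the proofs are below) =====
def Claim_equal_solution : Prop := ∀ (steps_one : List Int) (names_one : List String) (steps_two : List Int) (names_two : List String) (steps_three : List Int) (names_three : List String), Dom_solution steps_one names_one steps_two names_two steps_three names_three → Spec_solution steps_one names_one steps_two names_two steps_three names_three (solution steps_one names_one steps_two names_two steps_three names_three)

-- ===== LEMMAS AND PROOFS =====

-- A's max-dict build, observed through get? at one key, is exactly B's bestStep fold.
theorem build_get (z : List (Int × String)) (m : PySem.Dict String Int) (k : String) :
    (z.foldl (fun m p => if m.contains p.2 then m.insert p.2 (max (m.getD p.2 0) p.1) else m.insert p.2 p.1) m).get? k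
      = z.foldl (fun o p => if p.2 == k && (o.isNone || decide (o.getD 0 < p.1)) then some p.1 else o) (m.get? k) := by
  induction z generalizing m with
  | nil => rfl
  | cons p rest ih =>
    simp only [List.foldl_cons]
    rw [ih]
    congr 1
    rw [PySem.Dict.contains_eq_isSome_get?, PySem.Dict.getD_eq_get?_getD]
    by_cases hk : p.2 = k
    · subst hk
      cases h : m.get? p.2 with
      | none => simp [PySem.Dict.get?_insert]
      | some v =>
        simp only [h, Option.isSome_some, Option.getD_some, beq_self_eq_true,
          Option.isNone_some, Bool.false_or, if_true, PySem.Dict.get?_insert]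
        by_cases hlt : v < p.1
        · simp [hlt, max_eq_right hlt.le]
        · simp [hlt, max_eq_left (not_lt.mp hlt)]
    · have hbeq : (p.2 == k) = false := beq_eq_false_iff_ne.mpr hk
      simp only [hbeq, Bool.false_and, Bool.false_eq_true, if_false]
      split <;> rw [PySem.Dict.get?_insert, if_neg (fun h => hk h.symm)]

theorem bestStep_eq_build_get (z : List (Int × String)) (k : String) :
    bestStep z k
      = (z.foldl (fun m p => if m.contains p.2 then m.insert p.2 (max (m.getD p.2 0) p.1) else m.insert p.2 p.1) PySem.Dict.empty).get? k := by
  rw [build_get]; rfl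

-- the merge body is a plain add-insert (default 0 makes the missing-key branch agree)
theorem merge_body_eq :
    (fun (a : PySem.Dict String Int) (kv : String × Int) => if a.contains kv.1 then a.insert kv.1 (a.getD kv.1 0 + kv.2) else a.insert kv.1 kv.2)
      = fun a kv => a.insert kv.1 (a.getD kv.1 0 + kv.2) := by
  funext a kv
  split
  · rfl
  · rename_i h
    rw [PySem.Dict.getD_of_not_contains a 0 (by simpa using h), zero_add]

theorem merge_getD (l : List (String × Int)) (a : PySem.Dict String Int) (k : String) :
    (l.foldl (fun a kv => a.insert kv.1 (a.getD kv.1 0 + kv.2)) a).getD k 0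
      = a.getD k 0 + ((l.filter (fun p => p.1 == k)).map (fun p => p.2)).sum := by
  induction l generalizing a with
  | nil => simp
  | cons kv rest ih =>
    simp only [List.foldl_cons, ih, List.filter_cons]
    rw [PySem.Dict.getD_insert]
    by_cases hk : kv.1 = k
    · have hbeq : (kv.1 == k) = true := beq_iff_eq.mpr hk
      simp [hk, add_assoc]
    · have hbeq : (kv.1 == k) = false := beq_eq_false_iff_ne.mpr hk
      simp [Ne.symm hk, hbeq]

-- on a nodup-key pair list, that filtered sum is the dict lookup
theorem filter_sum_eq_getD (l : List (String × Int)) (hnd : (l.map (fun p => p.1)).Nodup) (k : String) :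
    ((l.filter (fun p => p.1 == k)).map (fun p => p.2)).sum = (PySem.Dict.mk l).getD k 0 := by
  induction l with
  | nil => simp [PySem.Dict.getD_eq_get?_getD, PySem.Dict.get?]
  | cons kv rest ih =>
    simp only [List.map_cons, List.nodup_cons] at hnd
    rw [List.filter_cons, PySem.Dict.getD_eq_get?_getD]
    have hcons : (PySem.Dict.mk (kv :: rest)).get? k = if (kv.1 == k) = true then some kv.2 else (PySem.Dict.mk rest).get? k :=
      PySem.Dict.get?_mk_cons kv.1 kv.2 rest k
    rw [hcons]
    by_cases hk : kv.1 = k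
    · have hbeq : (kv.1 == k) = true := beq_iff_eq.mpr hk
      have hfil : rest.filter (fun p => p.1 == k) = [] := by
        apply List.filter_eq_nil_iff.mpr
        intro p hp hb
        exact absurd (by rw [hk, ← beq_iff_eq.mp hb]; exact List.mem_map_of_mem hp) hnd.1
      simp [hbeq, hfil]
    · have hbeq : (kv.1 == k) = false := beq_eq_false_iff_ne.mpr hk
      rw [hbeq]
      simpa [PySem.Dict.getD_eq_get?_getD] using ih hnd.2

-- A's single build loop, rewritten as an unconditional insert (for the keys lemmas)
theorem build_body_eq :
    (fun (m : PySem.Dict String Int) (p : Int × String) => if m.contains p.2 then m.insert p.2 (max (m.getD p.2 0) p.1) else m.insert p.2 p.1)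
      = fun m p => m.insert p.2 (if m.contains p.2 then max (m.getD p.2 0) p.1 else p.1) := by
  funext m p; split <;> simp_all

theorem nMap_keys (z : List (Int × String)) :
    (z.foldl (fun m p => if m.contains p.2 then m.insert p.2 (max (m.getD p.2 0) p.1) else m.insert p.2 p.1) PySem.Dict.empty).keys
      = PySem.Set.ofList (z.map (fun p => p.2)) := by
  rw [build_body_eq, PySem.Dict.keys_foldl_insert_key]
  have h : (PySem.Dict.empty : PySem.Dict String Int).keys = [] := rfl
  rw [h, PySem.Set.update_nil_left]

theorem nMap_keys_nodup (z : List (Int × String)) :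
    (z.foldl (fun m p => if m.contains p.2 then m.insert p.2 (max (m.getD p.2 0) p.1) else m.insert p.2 p.1) PySem.Dict.empty).keys.Nodup := by
  rw [nMap_keys]; exact PySem.Set.nodup_ofList _

-- updating with a deduplicated list is updating with the raw list
theorem update_ofList (s : PySem.Set String) (xs : List String) :
    PySem.Set.update s (PySem.Set.ofList xs) = PySem.Set.update s xs := by
  rw [PySem.Set.update_eq_append_filter, PySem.Set.update_eq_append_filter, PySem.Set.ofList_ofList]

-- calculate, observed through getD at a key
theorem calculate_getD (a : PySem.Dict String Int) (ns : List String) (ss : List Int) (k : String) :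
    (calculate a ns ss).getD k 0 = a.getD k 0 + (bestStep (ss.zip ns) k).getD 0 := by
  unfold calculate
  rw [merge_body_eq, merge_getD, filter_sum_eq_getD _ (nMap_keys_nodup (ss.zip ns)) k]
  rw [bestStep_eq_build_get, PySem.Dict.getD_eq_get?_getD]
  rfl

-- calculate, observed through keys
theorem calculate_keys (a : PySem.Dict String Int) (ns : List String) (ss : List Int) :
    (calculate a ns ss).keys = PySem.Set.update a.keys ((ss.zip ns).map (fun p => p.2)) := by
  unfold calculate
  rw [merge_body_eq, PySem.Dict.keys_foldl_insert_key]
  have h : ∀ (d : PySem.Dict String Int), d.items.map (fun kv => kv.1) = d.keys := fun _ => rfl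
  rw [h, nMap_keys, update_ofList]

theorem foldl_append_fst (l : List (String × Int)) (acc : List String) :
    l.foldl (fun r i => r ++ [i.1]) acc = acc ++ l.map (fun i => i.1) := by
  induction l generalizing acc with
  | nil => simp
  | cons x rest ih => simp [ih]

-- ===== VERDICT (by name: the statement is the Claim_ definition above) =====
theorem solution_spec : Claim_equal_solution := by
  intro s1 n1 s2 n2 s3 n3 _
  unfold Spec_solution
  have hA : solution s1 n1 s2 n2 s3 n3
      = (PySem.List.sorted2 (calculate (calculate (calculate PySem.Dict.empty n1 s1) n2 s2) n3 s3).items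
          (fun x => x.2) (fun x => x.1) true).foldl (fun r i => r ++ [i.1]) [] := rfl
  have hB : solution_alt s1 n1 s2 n2 s3 n3
      = (PySem.List.sorted2
          ((PySem.List.dedup ([s1.zip n1, s2.zip n2, s3.zip n3].flatMap (fun g => g.map (fun p => p.2)))).map
            (fun name => (name, totalSteps [s1.zip n1, s2.zip n2, s3.zip n3] name)))
          (fun x => x.2) (fun x => x.1) true).map (fun x => x.1) := rfl
  rw [hA, hB]
  set answer := calculate (calculate (calculate PySem.Dict.empty n1 s1) n2 s2) n3 s3 with hans
  have hkeys : answer.keys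
      = PySem.Set.update (PySem.Set.update (PySem.Set.ofList ((s1.zip n1).map (fun p => p.2))) ((s2.zip n2).map (fun p => p.2))) ((s3.zip n3).map (fun p => p.2)) := by
    rw [hans, calculate_keys, calculate_keys, calculate_keys]
    have h0 : (PySem.Dict.empty : PySem.Dict String Int).keys = [] := rfl
    rw [h0, PySem.Set.update_nil_left]
  have hnodup : answer.keys.Nodup := by
    rw [hkeys]
    exact PySem.Set.nodup_update _ _ (PySem.Set.nodup_update _ _ (PySem.Set.nodup_ofList _))
  have hgetD : ∀ k, answer.getD k 0 = totalSteps [s1.zip n1, s2.zip n2, s3.zip n3] k := by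
    intro k
    rw [hans, calculate_getD, calculate_getD, calculate_getD]
    have h0 : (PySem.Dict.empty : PySem.Dict String Int).getD k 0 = 0 := rfl
    rw [h0]
    unfold totalSteps
    simp only [List.foldl_cons, List.foldl_nil]
    cases bestStep (s1.zip n1) k <;> cases bestStep (s2.zip n2) k <;> cases bestStep (s3.zip n3) k <;> simp
  have hnames : PySem.List.dedup ([s1.zip n1, s2.zip n2, s3.zip n3].flatMap (fun g => g.map (fun p => p.2))) = answer.keys := by
    rw [hkeys]
    simp only [List.flatMap_cons, List.flatMap_nil, List.append_nil, PySem.List.dedup_eq_ofList]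
    rw [PySem.Set.ofList_append, PySem.Set.update_append]
  have hitems : answer.items = answer.keys.map (fun k => (k, answer.getD k 0)) :=
    PySem.Dict.items_eq_map_keys answer hnodup 0
  rw [foldl_append_fst, List.nil_append, hitems, hnames]
  have hmap : answer.keys.map (fun k => (k, answer.getD k 0))
      = answer.keys.map (fun name => (name, totalSteps [s1.zip n1, s2.zip n2, s3.zip n3] name)) :=
    List.map_congr_left (fun k _ => by rw [hgetD])
  rw [hmap]
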